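-- pv_equiv track=rewrite | github.com/Wos2610/Python | PY01027.py | check
-- ===== SOURCE A (Python) =====
-- def check(s):
--     n = len(s)
--     d = 0
--     for i in range(n):
--         if s[i] != '6' and s[i] != '8':
--             return False
--         else:
--             if s[i] == '8': d += 1
--             else: d = 0
--             if d == 3: return False
--     return True
-- ===== SOURCE B (Python) =====
-- def check(s):
--     return all(c in '68' for c in s) and '888' not in s
-- ===== Notes on version B (the rewrite author's own statement) =====
-- stated objective: idiomatic
-- what changed: Replaces the indexed loop with a per-character counter of consecutive 8s by two stateless whole-string checks: all characters in '68' and no '888' substring.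
import Mathlib
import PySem

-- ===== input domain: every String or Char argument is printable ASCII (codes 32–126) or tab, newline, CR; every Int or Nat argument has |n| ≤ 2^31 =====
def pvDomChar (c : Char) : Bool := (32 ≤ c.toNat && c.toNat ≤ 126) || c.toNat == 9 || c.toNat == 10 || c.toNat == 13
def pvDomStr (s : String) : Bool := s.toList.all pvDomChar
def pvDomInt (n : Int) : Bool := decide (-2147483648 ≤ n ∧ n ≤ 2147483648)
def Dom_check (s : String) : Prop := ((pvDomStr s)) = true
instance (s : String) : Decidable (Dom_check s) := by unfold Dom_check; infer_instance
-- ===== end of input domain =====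

-- B is the idiomatic stateless version: all characters in '68' and no '888' substring,
-- instead of A's indexed loop with a consecutive-8 counter. Same value on every string.

-- ===== PORT A =====
-- the loop body of A, recursing over the remaining characters with the counter d
def checkGo : List Char → Int → Bool
  | [], _ => true
  | c :: rest, d =>
    if c ≠ '6' ∧ c ≠ '8' then false
    else
      let d' : Int := if c = '8' then d + 1 else 0
      if d' = 3 then false else checkGo rest d'

def check (s : String) : Bool := checkGo s.toList 0

-- ===== PORT B =====
def check_alt (s : String) : Bool :=
  (s.toList.all fun c => PySem.Chars.isIn [c] ['6', '8']) &&
    !(PySem.Str.isIn "888" s)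

-- ===== PRECONDITION & SPEC =====
def Spec_check (s : String) (out : Bool) : Prop := out = check_alt s
instance (s : String) (out : Bool) : Decidable (Spec_check s out) := by unfold Spec_check; infer_instance

-- ===== CLAIM (what is proved, stated in full; the proofs are below) =====
def Claim_equal_check : Prop := ∀ (s : String), Dom_check s → Spec_check s (check s)

-- ===== LEMMAS AND PROOFS =====

-- `c in '68'` is plain membership
lemma mem68 (c : Char) :
    PySem.Chars.isIn [c] ['6', '8'] = (c == '6' || c == '8') := by
  by_cases h6 : c = '6'
  · subst h6; decide
  · by_cases h8 : c = '8'
    · subst h8; decide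
    · have : PySem.Chars.isIn [c] ['6', '8'] = false := by
        rw [PySem.Chars.isIn_eq_false_iff]
        intro h
        have := h.sublist.subset (List.mem_singleton.mpr rfl)
        simp at this
        rcases this with h | h <;> simp_all
      simp [this, h6, h8]
  
-- no '888' fits inside at most two characters
lemma isIn_short (l : List Char) (hl : l.length ≤ 2) :
    PySem.Chars.isIn ['8','8','8'] l = false := by
  rw [PySem.Chars.isIn_eq_false_iff]
  intro h
  have := h.length_le
  simp at this
  omega

-- an occurrence of '888' in  8^d ++ '6' :: xs  (d ≤ 2) lies entirely in xs, and conversely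
lemma isIn_six (d : Nat) (hd : d ≤ 2) (xs : List Char) :
    PySem.Chars.isIn ['8','8','8'] (List.replicate d '8' ++ '6' :: xs)
      = PySem.Chars.isIn ['8','8','8'] xs := by
  cases hb : PySem.Chars.isIn ['8','8','8'] xs
  · rw [← Bool.not_eq_true] at hb ⊢
    intro h
    apply hb
    have ⟨j, hj⟩ := (PySem.Chars.exists_prefix_drop_iff_isIn _ _).mpr h
    apply (PySem.Chars.exists_prefix_drop_iff_isIn _ _).mp
    interval_cases d <;>
      [ (rcases j with _ | j);
        (rcases j with _ | _ | j);
        (rcases j with _ | _ | _ | j) ] <;>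
      simp [List.cons_prefix_cons] at hj <;>
      exact ⟨j, by simpa using hj⟩
  · have ⟨j, hj⟩ := (PySem.Chars.exists_prefix_drop_iff_isIn _ _).mpr hb
    apply (PySem.Chars.exists_prefix_drop_iff_isIn _ _).mp
    refine ⟨j + d + 1, ?_⟩
    interval_cases d <;> simpa [List.drop_succ_cons] using hj

-- loop invariant: with d trailing eights already seen, A's loop answers B's two checks
lemma checkGo_eq (xs : List Char) (d : Nat) (hd : d ≤ 2) :
    checkGo xs (d : Int)
      = ((xs.all fun c => PySem.Chars.isIn [c] ['6','8']) &&
          !(PySem.Chars.isIn ['8','8','8'] (List.replicate d '8' ++ xs))) := by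
  induction xs generalizing d with
  | nil =>
    simp [checkGo, isIn_short (List.replicate d '8') (by simpa using hd)]
  | cons c rest ih =>
    by_cases h6 : c = '6'
    · subst h6
      have i0 := ih 0 (by omega)
      simp only [Nat.cast_zero] at i0
      simp only [checkGo]
      rw [if_neg (by decide : ¬(('6':Char) ≠ '6' ∧ ('6':Char) ≠ '8')),
          if_neg (by decide : ¬(('6':Char) = '8'))]
      rw [if_neg (by decide : ¬((0:Int) = 3)), i0, isIn_six d hd rest]
      simp [mem68]
    · by_cases h8 : c = '8'
      · subst h8
        by_cases h3 : d = 2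
        · subst h3
          have h8t : PySem.Chars.isIn ['8','8','8']
              ('8' :: '8' :: '8' :: rest) = true := by
            apply (PySem.Chars.exists_prefix_drop_iff_isIn _ _).mp
            exact ⟨0, by simp [List.cons_prefix_cons]⟩
          simp [checkGo, List.replicate, h8t]
        · have hrep : List.replicate d '8' ++ '8' :: rest
              = List.replicate (d+1) '8' ++ rest := by
            simp [List.replicate_succ', List.append_assoc]
          have hcast : ((d : Int) + 1) = ((d + 1 : Nat) : Int) := by push_cast; ring
          have ihd := ih (d+1) (by omega)
          simp only [checkGo]
          rw [if_neg (by decide : ¬(('8':Char) ≠ '6' ∧ ('8':Char) ≠ '8'))]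
          simp only [if_true]
          rw [if_neg (by omega : ¬((d : Int) + 1 = 3)), hcast, ihd, hrep]
          simp [mem68]
      · simp [checkGo, mem68, h6, h8]

-- ===== VERDICT (by name: the statement is the Claim_ definition above) =====
theorem check_spec : Claim_equal_check := by
  intro s _
  unfold Spec_check check check_alt
  have h888 : ("888" : String).toList = ['8','8','8'] := rfl
  have := checkGo_eq s.toList 0 (by omega)
  simpa [h888] using this
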